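-- pv_equiv track=rewrite | github.com/StevenUST/GuanDanZero | utils.py | separateCardCombByCardNum
-- ===== SOURCE A (Python) =====
-- from typing import List, Dict, Final, Optional, Tuple, Union, Iterable, Callable
--
-- POWERS: Final[List[str]] = ['2', '3', '4', '5', '6',
--                             '7', '8', '9', 'T', 'J', 'Q', 'K', 'A', 'B', 'R']
--
-- def separateCardCombByCardNum(card_combs: List[List[str]], power_A_first: bool = False) -> List[List[List]]:
--     separated_card_combs = list()
--     index = 0
--     list_for_A = None
--
--     for p in POWERS:
--         if index >= len(card_combs):
--             if p == 'A':
--                 list_for_A = list()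
--             separated_card_combs.append([])
--         else:
--             temp = list()
--             while card_combs[index][0][1] == p:
--                 temp.append(card_combs[index].copy())
--                 index += 1
--                 if index >= len(card_combs):
--                     break
--             if p == 'A':
--                 list_for_A = temp.copy()
--             separated_card_combs.append(temp)
--     if power_A_first:
--         separated_card_combs.insert(0, list_for_A)
--     return separated_card_combs
-- ===== SOURCE B (Python) =====
-- from typing import List
--
-- POWERS = ['2', '3', '4', '5', '6', '7', '8', '9', 'T', 'J', 'Q', 'K', 'A', 'B', 'R']
--
--
-- def separateCardCombByCardNum(card_combs: List[List[str]], power_A_first: bool = False) -> List[List[List]]: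
--     # Lazy groupby: yields (power_char, run_iterator) for maximal contiguous
--     # runs of equal power character, reading the input strictly on demand.
--     def groups(cards):
--         it = iter(cards)
--         hold = next(it, None)
--
--         def run(k):
--             nonlocal hold
--             while hold is not None and hold[0][1] == k:
--                 yield hold
--                 hold = next(it, None)
--
--         while hold is not None:
--             k = hold[0][1]
--             yield k, run(k)
--
--     # Two-pointer merge of the group stream against the 15 fixed POWERS slots:
--     # a group is consumed only when its key matches the current power, so the
--     # stream stays put (and the input is never read further) once the POWERS
--     # order breaks.
--     g = groups(card_combs)
--     cur = next(g, None)
--     slots = []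
--     for p in POWERS:
--         if cur is not None and cur[0] == p:
--             slots.append([c.copy() for c in cur[1]])
--             cur = next(g, None)
--         else:
--             slots.append([])
--     if power_A_first:
--         slots.insert(0, list(slots[12]))
--     return slots
-- ===== Notes on version B (the rewrite author's own statement) =====
-- stated objective: alternative
-- what changed: B replaces A's per-power indexed while-loop over a shared cursor by a lazy hand-rolled groupby (a generator yielding maximal contiguous (power, run) groups) merged two-pointer style into the 15 fixed POWERS slots, and reads the A-first slot back from slot 12 instead of tracking a separate list_for_A variable.
import Mathlib
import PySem

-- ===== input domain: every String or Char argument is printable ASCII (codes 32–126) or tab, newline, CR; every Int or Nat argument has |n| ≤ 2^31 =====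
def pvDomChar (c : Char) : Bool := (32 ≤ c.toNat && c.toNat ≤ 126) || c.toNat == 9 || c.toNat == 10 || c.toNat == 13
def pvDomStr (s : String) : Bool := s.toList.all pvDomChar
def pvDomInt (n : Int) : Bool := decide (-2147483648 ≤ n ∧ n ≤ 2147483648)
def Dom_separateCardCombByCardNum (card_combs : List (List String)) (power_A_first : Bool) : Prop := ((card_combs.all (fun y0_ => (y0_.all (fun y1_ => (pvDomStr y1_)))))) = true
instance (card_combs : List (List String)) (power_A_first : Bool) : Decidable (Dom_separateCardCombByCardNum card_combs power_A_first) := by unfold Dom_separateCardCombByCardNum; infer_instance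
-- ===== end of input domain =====

-- B replaces A's per-power stalled-index scan by a one-pass run partition followed by a
-- forward-only merge of the runs into the 15 fixed POWERS slots (objective: alternative).

-- ===== PORT A =====

-- c[0][1]: the power character of a comb; "" stands for the IndexError case (excluded by Pre_)
-- the power characters are one-character strings; they are represented as Char
-- (PySem.Str.pyGet? yields the character), so every `== p` compares equal one-char strings.
-- Char '\x00' stands for the IndexError case (excluded by Pre_; it matches no power)
def pvKey (c : List String) : Char :=
  ((PySem.List.pyGet? c 0).bind (fun s => PySem.Str.pyGet? s 1)).getD '\x00' 

def pvPOWERS : List Char :=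
  ['2', '3', '4', '5', '6', '7', '8', '9', 'T', 'J', 'Q', 'K', 'A', 'B', 'R']

-- the inner `while card_combs[index][0][1] == p` loop (the `if index >= len: break` folded
-- into the guard, as Python's entry into the branch guarantees index < len)
def pvAWhile (cc : List (List String)) (p : Char) (index : Nat) (temp : List (List String)) :
    List (List String) × Nat :=
  if h : index < cc.length ∧ pvKey (cc.getD index []) = p then
    pvAWhile cc p (index + 1) (temp ++ [cc.getD index []])
  else (temp, index)
termination_by cc.length - index
decreasing_by omega

-- one iteration of `for p in POWERS`, state = (separated_card_combs, index, list_for_A)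
def pvAStep (cc : List (List String))
    (st : List (List (List String)) × Nat × Option (List (List String))) (p : Char) :
    List (List (List String)) × Nat × Option (List (List String)) :=
  let (sep, index, lfa) := st
  if cc.length ≤ index then
    (sep ++ [[]], index, if p = 'A' then some [] else lfa)
  else
    let (temp, index') := pvAWhile cc p index []
    (sep ++ [temp], index', if p = 'A' then some temp else lfa)

def separateCardCombByCardNum (card_combs : List (List String)) (power_A_first : Bool) :
    List (List (List String)) :=
  let st := pvPOWERS.foldl (pvAStep card_combs) ([], 0, none)
  -- list_for_A is always set when the insert runs ('A' ∈ POWERS); getD [] is unreachable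
  if power_A_first then st.2.2.getD [] :: st.1 else st.1

-- ===== PORT B =====

-- the `run(k)` generator: the maximal prefix of equal key k, and the remaining input
def pvRunOf (k : Char) : List (List String) → List (List String) × List (List String)
  | [] => ([], [])
  | c :: cs =>
      if pvKey c = k then ((c :: (pvRunOf k cs).1), (pvRunOf k cs).2)
      else ([], c :: cs)

-- cited by pvBGroups' decreasing_by
theorem pvRunOf_rest_length (k : Char) (l : List (List String)) :
    (pvRunOf k l).2.length ≤ l.length := by
  induction l with
  | nil => simp [pvRunOf]
  | cons c cs ih =>
    by_cases hc : pvKey c = k <;> simp [pvRunOf, hc]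
    omega

-- the `groups` generator as the (finite) stream of groups it yields: Python yields the
-- groups lazily (laziness only affects which combs are ever read, i.e. exception timing,
-- which Pre_ excludes); the values are these
def pvBGroups : List (List String) → List (Char × List (List String))
  | [] => []
  | c :: cs =>
      (pvKey c, c :: (pvRunOf (pvKey c) cs).1) :: pvBGroups (pvRunOf (pvKey c) cs).2
termination_by l => l.length
decreasing_by
  exact Nat.lt_succ_of_le (pvRunOf_rest_length _ _)

-- the merge loop: cur = head of the remaining group stream; `cur = next(g, None)` = tail
def pvBMerge : List Char → List (Char × List (List String)) → List (List (List String))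
  | [], _ => []
  | _ :: ps, [] => [] :: pvBMerge ps []
  | p :: ps, (k, r) :: rest =>
      if k = p then r :: pvBMerge ps rest
      else [] :: pvBMerge ps ((k, r) :: rest)

def separateCardCombByCardNum_alt (card_combs : List (List String)) (power_A_first : Bool) :
    List (List (List String)) :=
  let slots := pvBMerge pvPOWERS (pvBGroups card_combs)
  -- slots.insert(0, list(slots[12])); slots always has 15 elements, so getD is exact
  if power_A_first then slots.getD 12 [] :: slots else slots

-- ===== PRECONDITION & SPEC =====

-- a well-formed comb: non-empty, and its first card has the power character c[0][1]
def pvWF (c : List String) : Bool := !c.isEmpty && 2 ≤ (c.headD "").toList.length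

-- Pre_ excludes exactly the lists on which A (and B alike) raises IndexError reading
-- comb[0][1] of a malformed comb (an empty comb, or one whose first card has fewer than
-- 2 characters): a malformed comb is harmless iff some earlier well-formed comb can never
-- be consumed — its power character is outside POWERS, or its power sits strictly below
-- that of an even earlier well-formed comb — since the forward-only scan stalls there and
-- never reads anything behind it.
def Pre_separateCardCombByCardNum (card_combs : List (List String)) (power_A_first : Bool) :
    Prop :=
  ∀ i, i < card_combs.length → pvWF (card_combs.getD i []) = false →
    ∃ j, j < i ∧ pvWF (card_combs.getD j []) = true ∧
      (pvPOWERS.idxOf (pvKey (card_combs.getD j [])) = pvPOWERS.length ∨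
       ∃ j2, j2 < j ∧ pvWF (card_combs.getD j2 []) = true ∧
         pvPOWERS.idxOf (pvKey (card_combs.getD j []))
           < pvPOWERS.idxOf (pvKey (card_combs.getD j2 [])))

instance (card_combs : List (List String)) (power_A_first : Bool) :
    Decidable (Pre_separateCardCombByCardNum card_combs power_A_first) := by
  unfold Pre_separateCardCombByCardNum; infer_instance

def pvWitness_separateCardCombByCardNum : List (List String) × Bool :=
  ([["S2", "H2"], ["S3"]], true)

def Spec_separateCardCombByCardNum (card_combs : List (List String)) (power_A_first : Bool)
    (out : List (List (List String))) : Prop :=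
  out = separateCardCombByCardNum_alt card_combs power_A_first

instance (card_combs : List (List String)) (power_A_first : Bool)
    (out : List (List (List String))) :
    Decidable (Spec_separateCardCombByCardNum card_combs power_A_first out) := by
  unfold Spec_separateCardCombByCardNum; infer_instance

-- ===== CLAIM (what is proved, stated in full; the proofs are below) =====
def Claim_equal_separateCardCombByCardNum : Prop := ∀ (card_combs : List (List String)) (power_A_first : Bool), Dom_separateCardCombByCardNum card_combs power_A_first → Pre_separateCardCombByCardNum card_combs power_A_first → Spec_separateCardCombByCardNum card_combs power_A_first (separateCardCombByCardNum card_combs power_A_first)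

-- ===== LEMMAS AND PROOFS =====

-- structural (right-recursive) run grouping, the proof-side view of pvBRuns
def pvGroupRuns : List (List String) → List (Char × List (List String))
  | [] => []
  | c :: cs =>
    match pvGroupRuns cs with
    | (k, r) :: rest =>
        if pvKey c = k then (k, c :: r) :: rest
        else (pvKey c, [c]) :: (k, r) :: rest
    | [] => [(pvKey c, [c])]

-- runs left over after pvBMerge has merged the powers ps
def pvMergeRest : List Char → List (Char × List (List String)) →
    List (Char × List (List String))
  | [], rs => rs
  | _ :: ps, [] => pvMergeRest ps []
  | p :: ps, (k, r) :: rest =>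
      if k = p then pvMergeRest ps rest else pvMergeRest ps ((k, r) :: rest)

-- the list_for_A variable, threaded the way A threads it, expressed on the runs
def pvLfaOf : List Char → List (Char × List (List String)) →
    Option (List (List String)) → Option (List (List String))
  | [], _, lfa => lfa
  | p :: ps, [], lfa => pvLfaOf ps [] (if p = 'A' then some [] else lfa)
  | p :: ps, (k, r) :: rest, lfa =>
      if k = p then pvLfaOf ps rest (if p = 'A' then some r else lfa)
      else pvLfaOf ps ((k, r) :: rest) (if p = 'A' then some [] else lfa)

def pvFlat (rs : List (Char × List (List String))) : List (List String) :=
  (rs.map Prod.snd).flatten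

theorem pvFlat_groupRuns (l : List (List String)) : pvFlat (pvGroupRuns l) = l := by
  induction l with
  | nil => rfl
  | cons c cs ih =>
    rw [pvGroupRuns]
    rcases hg : pvGroupRuns cs with _ | ⟨⟨k2, r2⟩, rest2⟩ <;> rw [hg] at ih
    · simp [pvFlat] at ih ⊢
      exact ih
    · by_cases hc : pvKey c = k2 <;> simp [hc, pvFlat] at ih ⊢ <;> simp [ih]

theorem pvGroupRuns_eq_nil (cs : List (List String)) (h : pvGroupRuns cs = []) : cs = [] := by
  cases cs with
  | nil => rfl
  | cons c cs =>
    rw [pvGroupRuns] at h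
    rcases hg : pvGroupRuns cs with _ | ⟨⟨k2, r2⟩, rest⟩ <;> rw [hg] at h <;> simp at h
    split at h <;> simp at h

theorem pvGroupRuns_head_key (c : List String) (cs : List (List String)) (k : Char)
    (r : List (List String)) (rest : List (Char × List (List String)))
    (h : pvGroupRuns (c :: cs) = (k, r) :: rest) : k = pvKey c := by
  rw [pvGroupRuns] at h
  rcases hg : pvGroupRuns cs with _ | ⟨⟨k2, r2⟩, rest2⟩ <;> rw [hg] at h
  · simp at h; exact h.1.1.symm
  · by_cases hc : pvKey c = k2 <;> simp [hc] at h
    · exact h.1.1.symm.trans hc.symm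
    · exact h.1.1.symm

theorem pvRunOf_nil_run (k : Char) (l : List (List String)) (h : (pvRunOf k l).1 = []) :
    (pvRunOf k l).2 = l := by
  cases l with
  | nil => rfl
  | cons c cs =>
    by_cases hc : pvKey c = k <;> simp [pvRunOf, hc] at h ⊢

theorem pvGroupRuns_runOf (cs : List (List String)) (k : Char) :
    pvGroupRuns cs
      = if (pvRunOf k cs).1 = [] then pvGroupRuns (pvRunOf k cs).2
        else (k, (pvRunOf k cs).1) :: pvGroupRuns (pvRunOf k cs).2 := by
  induction cs with
  | nil => simp [pvRunOf]
  | cons c cs ih =>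
    by_cases hc : pvKey c = k
    · simp only [pvRunOf, hc, if_pos, reduceCtorEq, if_neg, not_false_iff]
      by_cases hr : (pvRunOf k cs).1 = []
      · have hrest : (pvRunOf k cs).2 = cs := pvRunOf_nil_run k cs hr
        rw [pvGroupRuns]
        rcases hg : pvGroupRuns cs with _ | ⟨⟨k2, r2⟩, t⟩
        · have : cs = [] := pvGroupRuns_eq_nil cs hg
          simp [this, hc, pvGroupRuns, pvRunOf]
        · rcases cs with _ | ⟨c2, cs2⟩
          · simp [pvGroupRuns] at hg
          · have hk2 : k2 = pvKey c2 := pvGroupRuns_head_key c2 cs2 k2 r2 t hg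
            have hc2 : ¬pvKey c2 = k := by
              intro hh
              simp [pvRunOf, hh] at hr
            have : ¬pvKey c = k2 := by rw [hk2, hc]; exact fun hh => hc2 hh.symm
            simp [hr, hrest, hg, hc]
            exact fun hh => this (hc.trans hh)
      · rw [pvGroupRuns, ih]
        simp [hr, hc]
    · simp [pvRunOf, hc]

theorem pvBGroups_eq_groupRuns (cs : List (List String)) : pvBGroups cs = pvGroupRuns cs := by
  induction cs using pvBGroups.induct with
  | case1 => rw [pvBGroups]; rfl
  | case2 c cs ih =>
    rw [pvBGroups, ih]
    have h := pvGroupRuns_runOf (c :: cs) (pvKey c)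
    rw [show pvRunOf (pvKey c) (c :: cs)
          = (c :: (pvRunOf (pvKey c) cs).1, (pvRunOf (pvKey c) cs).2) from by
        simp [pvRunOf]] at h
    simpa using h.symm

theorem pvGroupRuns_structure (cs : List (List String)) (k : Char)
    (r : List (List String)) (rest : List (Char × List (List String)))
    (h : pvGroupRuns cs = (k, r) :: rest) :
    ∃ cs', cs = r ++ cs' ∧ r ≠ [] ∧ (∀ c ∈ r, pvKey c = k) ∧ pvGroupRuns cs' = rest ∧
      (∀ c', cs'.head? = some c' → pvKey c' ≠ k) := by
  induction cs generalizing k r rest with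
  | nil => simp [pvGroupRuns] at h
  | cons c cs ih =>
    rw [pvGroupRuns] at h
    rcases hg : pvGroupRuns cs with _ | ⟨⟨k2, r2⟩, rest2⟩ <;> rw [hg] at h
    · simp only [List.cons.injEq, Prod.mk.injEq] at h
      obtain ⟨⟨hk, hr⟩, hrest⟩ := h
      refine ⟨[], by simp [← hr, pvGroupRuns_eq_nil cs hg], by simp [← hr],
        ?_, by simpa [pvGroupRuns] using hrest, by simp⟩
      intro x hx
      simp [← hr] at hx
      simp [hx, hk]
    · by_cases hc : pvKey c = k2
      · simp only [if_pos hc] at h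
        simp only [List.cons.injEq, Prod.mk.injEq] at h
        obtain ⟨⟨hk, hr⟩, hrest⟩ := h
        obtain ⟨cs', he, -, hkeys, hgr, hhead⟩ := ih k2 r2 rest2 hg
        refine ⟨cs', by simp [← hr, he], by simp [← hr], ?_, by rw [hgr, hrest], ?_⟩
        · intro x hx
          rw [← hr] at hx; rw [← hk]
          rcases List.mem_cons.mp hx with h1 | h1
          · rw [h1, hc]
          · exact hkeys x h1
        · intro c' hc'
          rw [← hk]; exact hhead c' hc'
      · simp only [if_neg hc] at h
        simp only [List.cons.injEq, Prod.mk.injEq] at h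
        obtain ⟨⟨hk, hr⟩, hrest⟩ := h
        refine ⟨cs, by simp [← hr], by simp [← hr], ?_, by rw [hg, hrest], ?_⟩
        · intro x hx
          simp [← hr] at hx
          simp [hx, hk]
        · intro c' hc'
          cases cs with
          | nil => simp at hc'
          | cons c2 cs2 =>
            simp at hc'
            have h2 := pvGroupRuns_head_key c2 cs2 k2 r2 rest2 (by rw [hg])
            have h3 : pvKey c' = k2 := by rw [← hc', ← h2]
            rw [h3, ← hk]
            exact fun hh => hc hh.symm

theorem pvAWhile_consume (cc : List (List String)) (p : Char)
    (r l' : List (List String)) :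
    ∀ (i : Nat) (acc : List (List String)), cc.drop i = r ++ l' → (∀ c ∈ r, pvKey c = p) →
    (∀ c', l'.head? = some c' → pvKey c' ≠ p) →
    pvAWhile cc p i acc = (acc ++ r, i + r.length) := by
  induction r with
  | nil =>
    intro i acc hdrop _ hstop
    rw [pvAWhile, dif_neg]
    · simp
    · cases hl : l'.head? with
      | none =>
        have : l'.length = 0 := by cases l' <;> simp_all
        have : cc.length ≤ i := by
          have := congrArg List.length hdrop
          simp at this; omega
        intro hc; omega
      | some c' =>
        intro hc
        have hk : pvKey (cc.getD i []) = p := hc.2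
        have : cc[i]? = some c' := by
          rw [← List.head?_drop, hdrop]; simpa using hl
        rw [List.getD, this] at hk
        exact hstop c' hl hk
  | cons c r' ih =>
    intro i acc hdrop hkeys hstop
    have hget : cc[i]? = some c := by rw [← List.head?_drop, hdrop]; rfl
    obtain ⟨hlt, -⟩ := List.getElem?_eq_some_iff.mp hget
    have hgd : cc.getD i [] = c := by rw [List.getD, hget]; rfl
    rw [pvAWhile, dif_pos]
    · rw [hgd]
      have hdrop' : cc.drop (i + 1) = r' ++ l' := by
        have := congrArg List.tail hdrop
        simpa [List.tail_drop] using this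
      rw [ih (i + 1) (acc ++ [c]) hdrop' (fun x hx => hkeys x (by simp [hx])) hstop]
      simp; omega
    · exact ⟨hlt, by rw [hgd]; exact hkeys c (by simp)⟩

theorem pvMainA (cc : List (List String)) :
    ∀ (ps : List Char) (i : Nat) (sep : List (List (List String)))
      (lfa : Option (List (List String))), i ≤ cc.length →
    List.foldl (pvAStep cc) (sep, i, lfa) ps =
      (sep ++ pvBMerge ps (pvGroupRuns (cc.drop i)),
       cc.length - (pvFlat (pvMergeRest ps (pvGroupRuns (cc.drop i)))).length,
       pvLfaOf ps (pvGroupRuns (cc.drop i)) lfa) := by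
  intro ps
  induction ps with
  | nil =>
    intro i sep lfa hi
    have hlen : (pvFlat (pvGroupRuns (cc.drop i))).length = cc.length - i := by
      rw [pvFlat_groupRuns]; simp
    simp only [List.foldl_nil, pvMergeRest, pvBMerge, pvLfaOf, hlen, List.append_nil]
    refine Prod.ext rfl (Prod.ext ?_ rfl)
    simp; omega
  | cons p ps ih =>
    intro i sep lfa hi
    rw [List.foldl_cons]
    rcases hg : pvGroupRuns (cc.drop i) with _ | ⟨⟨k, r⟩, rest⟩
    · have hdi : cc.drop i = [] := pvGroupRuns_eq_nil _ hg
      have hle : cc.length ≤ i := List.drop_eq_nil_iff.mp hdi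
      rw [show pvAStep cc (sep, i, lfa) p
            = (sep ++ [[]], i, if p = 'A' then some [] else lfa) from by
          simp [pvAStep, hle]]
      rw [ih i (sep ++ [[]]) _ hi, hg]
      simp [pvBMerge, pvMergeRest, pvLfaOf]
    · obtain ⟨cs', hsplit, hne, hkeys, hgr, hhead⟩ := pvGroupRuns_structure _ _ _ _ hg
      have hrl : 0 < r.length := List.length_pos_iff.mpr hne
      have hlen' : cc.length - i = r.length + cs'.length := by
        have := congrArg List.length hsplit
        simpa using this
      have hi2 : i < cc.length := by omega
      have hdrop2 : cc.drop (i + r.length) = cs' := by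
        have h1 : (cc.drop i).drop r.length = cs' := by
          rw [hsplit, List.drop_left]
        rw [List.drop_drop] at h1
        exact h1
      by_cases hk : k = p
      · have hstop : ∀ c', cs'.head? = some c' → pvKey c' ≠ p := by
          intro c' h1
          rw [← hk]; exact hhead c' h1
        have hw := pvAWhile_consume cc p r cs' i [] hsplit
          (fun c h1 => (hkeys c h1).trans hk) hstop
        rw [show pvAStep cc (sep, i, lfa) p
              = (sep ++ [r], i + r.length, if p = 'A' then some r else lfa) from by
            simp [pvAStep, Nat.not_le.mpr hi2, hw]]
        rw [ih (i + r.length) (sep ++ [r]) _ (by omega), hdrop2, hgr]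
        simp [pvBMerge, pvMergeRest, pvLfaOf, hk]
      · have hstop : ∀ c', (cc.drop i).head? = some c' → pvKey c' ≠ p := by
          intro c' h1
          rcases r with _ | ⟨c0, r0⟩
          · exact absurd rfl hne
          · rw [hsplit] at h1
            simp at h1
            rw [← h1]
            rw [hkeys c0 (by simp)]
            exact hk
        have hw := pvAWhile_consume cc p [] (cc.drop i) i [] (by simp)
          (by simp) hstop
        simp only [List.append_nil, List.length_nil, Nat.add_zero] at hw
        rw [show pvAStep cc (sep, i, lfa) p
              = (sep ++ [[]], i, if p = 'A' then some [] else lfa) from by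
            simp [pvAStep, Nat.not_le.mpr hi2, hw]]
        rw [ih i (sep ++ [[]]) _ hi, hg]
        simp [pvBMerge, pvMergeRest, pvLfaOf, hk]

theorem pvBMerge_append (a b : List Char) (rs : List (Char × List (List String))) :
    pvBMerge (a ++ b) rs = pvBMerge a rs ++ pvBMerge b (pvMergeRest a rs) := by
  induction a generalizing rs with
  | nil => simp [pvBMerge, pvMergeRest]
  | cons p ps ih =>
    cases rs with
    | nil => simp [pvBMerge, pvMergeRest, ih]
    | cons hd tl =>
      obtain ⟨k, r⟩ := hd
      by_cases hk : k = p <;> simp [pvBMerge, pvMergeRest, hk, ih]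

theorem pvBMerge_length (ps : List Char) (rs : List (Char × List (List String))) :
    (pvBMerge ps rs).length = ps.length := by
  induction ps generalizing rs with
  | nil => simp [pvBMerge]
  | cons p ps ih =>
    cases rs with
    | nil => simp [pvBMerge, ih]
    | cons hd tl =>
      obtain ⟨k, r⟩ := hd
      by_cases hk : k = p <;> simp [pvBMerge, hk, ih]

theorem pvLfaOf_append (a b : List Char) (rs : List (Char × List (List String)))
    (lfa : Option (List (List String))) :
    pvLfaOf (a ++ b) rs lfa = pvLfaOf b (pvMergeRest a rs) (pvLfaOf a rs lfa) := by
  induction a generalizing rs lfa with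
  | nil => simp [pvLfaOf, pvMergeRest]
  | cons p ps ih =>
    cases rs with
    | nil => simp [pvLfaOf, pvMergeRest, ih]
    | cons hd tl =>
      obtain ⟨k, r⟩ := hd
      by_cases hk : k = p <;> simp [pvLfaOf, pvMergeRest, hk, ih]

theorem pvLfaOf_noA (ps : List Char) (rs : List (Char × List (List String)))
    (lfa : Option (List (List String))) (h : 'A' ∉ ps) : pvLfaOf ps rs lfa = lfa := by
  induction ps generalizing rs lfa with
  | nil => rfl
  | cons p ps ih =>
    simp only [List.mem_cons, not_or] at h
    have hp : p ≠ 'A' := fun hp => h.1 hp.symm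
    cases rs with
    | nil => rw [pvLfaOf, if_neg hp, ih _ _ h.2]
    | cons hd tl =>
      obtain ⟨k, r⟩ := hd
      by_cases hk : k = p
      · rw [pvLfaOf, if_pos hk, if_neg hp, ih _ _ h.2]
      · rw [pvLfaOf, if_neg hk, if_neg hp, ih _ _ h.2]

-- the A-slot: list_for_A equals slot 12 of the merge
theorem pvLfa_eq_slot12 (rs : List (Char × List (List String)))
    (lfa : Option (List (List String))) :
    (pvLfaOf pvPOWERS rs lfa).getD [] = (pvBMerge pvPOWERS rs).getD 12 [] := by
  have h12 : pvPOWERS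
      = ['2', '3', '4', '5', '6', '7', '8', '9', 'T', 'J', 'Q', 'K'] ++ ('A' :: ['B', 'R']) :=
    rfl
  rw [h12, pvLfaOf_append, pvBMerge_append]
  rw [show ((pvBMerge ['2', '3', '4', '5', '6', '7', '8', '9', 'T', 'J', 'Q', 'K'] rs ++
        pvBMerge ['A', 'B', 'R']
          (pvMergeRest ['2', '3', '4', '5', '6', '7', '8', '9', 'T', 'J', 'Q', 'K'] rs)).getD 12 [])
      = (pvBMerge ['A', 'B', 'R']
          (pvMergeRest ['2', '3', '4', '5', '6', '7', '8', '9', 'T', 'J', 'Q', 'K'] rs)).getD 0 []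
    from by simp [List.getD, pvBMerge_length]]
  have hBR : 'A' ∉ (['B', 'R'] : List Char) := by decide
  cases hrs1 : pvMergeRest ['2', '3', '4', '5', '6', '7', '8', '9', 'T', 'J', 'Q', 'K'] rs with
  | nil => simp [pvLfaOf, pvBMerge]
  | cons hd tl =>
    obtain ⟨k, r⟩ := hd
    by_cases hk : k = 'A'
    · simp [pvLfaOf, pvBMerge, hk, pvLfaOf_noA _ _ _ hBR]
    · rw [pvLfaOf, if_neg hk, if_pos rfl, pvLfaOf_noA _ _ _ hBR]
      simp [pvBMerge, hk]

-- ===== VERDICT (by name: the statement is the Claim_ definition above) =====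
theorem separateCardCombByCardNum_spec : Claim_equal_separateCardCombByCardNum := by
  intro cc paf _ _
  unfold Spec_separateCardCombByCardNum separateCardCombByCardNum separateCardCombByCardNum_alt
  rw [pvBGroups_eq_groupRuns]
  have h := pvMainA cc pvPOWERS 0 [] none (Nat.zero_le _)
  simp only [List.drop_zero] at h
  rw [h]
  cases paf <;> simp [pvLfa_eq_slot12]
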